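-- pv_equiv track=rewrite | github.com/Yawn-Sean/Daily_CF_Problems | daily_problems/2025/06/0606/personal_submission/cf906a_liryc.py | solve
-- ===== SOURCE A (Python) =====
-- def solve(n: int, actions: list[str], words: list[str]) -> int:
--     s = set(chr(c) for c in range(97, 97 + 26))
--     ans = 0
--     for a, w in zip(actions[:-1], words[:-1]):
--         if len(s) == 1:
--             if a != '.':
--                 ans += 1
--         else:
--             if a == '.' or a == '?':
--                 s = s - set(w)
--             else:
--                 s = s & set(w)
--     return ans
-- ===== SOURCE B (Python) =====
-- def solve(n: int, actions: list[str], words: list[str]) -> int: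
--     # Per-letter view: each letter's fate is independent of the others, so instead of
--     # maintaining a shrinking set, compute each letter's elimination time ("death"),
--     # keep the top two death times, and read the answer off them.
--     pairs = list(zip(actions[:-1], words[:-1]))
--     m = len(pairs)
--     d1 = d2 = -1  # largest and second-largest death times seen so far
--     for o in range(97, 123):
--         c = chr(o)
--         d = m
--         for j, (a, w) in enumerate(pairs):
--             if (c in w) == (a == '.' or a == '?'):
--                 d = j
--                 break
--         if d > d1:
--             d1, d2 = d, d1
--         elif d > d2:
--             d2 = d
--     cut = d2 + 1  # first moment exactly one letter is still alive, if any
--     if cut <= d1 and cut < m: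
--         return sum(a != '.' for a, _ in pairs[cut:])
--     return 0
-- ===== Notes on version B (the rewrite author's own statement) =====
-- stated objective: alternative
-- what changed: A folds one shrinking candidate set through the rounds, interleaving deduction and mistake-counting; B maintains no set at all: each letter's fate is independent, so B computes every letter's elimination time, keeps only the two largest via a running top-two, and derives the answer as the count of non-'.' actions from second-largest+1 onward.
import Mathlib
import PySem

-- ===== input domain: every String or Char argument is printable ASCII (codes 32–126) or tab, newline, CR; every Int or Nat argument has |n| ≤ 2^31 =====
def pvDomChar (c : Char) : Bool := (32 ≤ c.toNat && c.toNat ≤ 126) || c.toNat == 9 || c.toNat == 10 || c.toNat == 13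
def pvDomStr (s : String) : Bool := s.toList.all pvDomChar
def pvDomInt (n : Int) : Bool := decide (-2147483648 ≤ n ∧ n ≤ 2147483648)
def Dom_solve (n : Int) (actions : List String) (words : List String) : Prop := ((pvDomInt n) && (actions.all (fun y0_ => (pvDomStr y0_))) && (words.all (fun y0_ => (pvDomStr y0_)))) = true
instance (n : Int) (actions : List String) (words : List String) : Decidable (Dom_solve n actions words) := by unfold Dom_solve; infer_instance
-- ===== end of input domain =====

-- B is an 'alternative' algorithm: A folds a shrinking candidate set through the rounds;
-- B maintains no set at all — each letter's fate is independent, so B computes every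
-- letter's elimination time, keeps the top two, and reads the answer off them.
-- Return values agree on all inputs (A is total).

-- ===== PORT A =====
-- set(chr(c) for c in range(97, 97 + 26))
def pvAlphabet : PySem.Set Char :=
  PySem.Set.ofList ((PySem.List.pyRange 97 (97 + 26) 1).map (fun c => Char.ofNat c.toNat))

-- the body of A's for-loop, on the state (s, ans)
def pvStepA (st : PySem.Set Char × Int) (aw : String × String) : PySem.Set Char × Int :=
  if PySem.Set.len st.1 == 1 then
    if aw.1 != "." then (st.1, st.2 + 1) else st
  else
    if aw.1 == "." || aw.1 == "?" then (PySem.Set.diff st.1 (PySem.Set.ofList aw.2.toList), st.2)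
    else (PySem.Set.inter st.1 (PySem.Set.ofList aw.2.toList), st.2)

def solve (n : Int) (actions : List String) (words : List String) : Int :=
  (((PySem.List.slice actions none (some (-1))).zip
      (PySem.List.slice words none (some (-1)))).foldl pvStepA (pvAlphabet, 0)).2

-- ===== PORT B =====
-- (c in w) == (a == '.' or a == '?')  — the round (a, w) eliminates letter c
def pvKill (c : Char) (a w : String) : Bool := (w.toList.contains c) == (a == "." || a == "?")

-- B's inner loop: d = m; for j, (a, w) in enumerate(pairs): if kill: d = j; break
def pvDeathAux (c : Char) : List (String × String) → Int → Int → Int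
  | [], _, m => m
  | (a, w) :: t, j, m => if pvKill c a w then j else pvDeathAux c t (j + 1) m

-- pairs = list(zip(actions[:-1], words[:-1]))
def pvPairs (actions : List String) (words : List String) : List (String × String) :=
  (PySem.List.slice actions none (some (-1))).zip (PySem.List.slice words none (some (-1)))

-- B's outer-loop body: compute this letter's death time, update the top two
def pvTop2 (ps : List (String × String)) (st : Int × Int) (o : Int) : Int × Int :=
  let d := pvDeathAux (Char.ofNat o.toNat) ps 0 (ps.length : Int)
  if d > st.1 then (d, st.1) else if d > st.2 then (st.1, d) else st

def solve_alt (n : Int) (actions : List String) (words : List String) : Int :=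
  let pairs := pvPairs actions words
  let dd := (PySem.List.pyRange 97 123 1).foldl (pvTop2 pairs) (-1, -1)
  let cut := dd.2 + 1
  if cut ≤ dd.1 ∧ cut < (pairs.length : Int) then
    ((PySem.List.slice pairs (some cut) none).countP (fun aw => aw.1 != ".") : Int)
  else 0

-- ===== PRECONDITION & SPEC =====
def Spec_solve (n : Int) (actions : List String) (words : List String) (out : Int) : Prop := out = solve_alt n actions words
instance (n : Int) (actions : List String) (words : List String) (out : Int) : Decidable (Spec_solve n actions words out) := by unfold Spec_solve; infer_instance

-- ===== CLAIM (what is proved, stated in full; the proofs are below) =====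
def Claim_equal_solve : Prop := ∀ (n : Int) (actions : List String) (words : List String), Dom_solve n actions words → Spec_solve n actions words (solve n actions words)

-- ===== LEMMAS AND PROOFS =====

-- once A's set has size 1 it never changes and A just counts non-'.' actions
theorem pvFoldA_len_one (ps : List (String × String)) (s : PySem.Set Char) (ans : Int)
    (h : PySem.Set.len s == 1) :
    (ps.foldl pvStepA (s, ans)).2 = ans + (ps.countP (fun aw => aw.1 != ".") : Int) := by
  induction ps generalizing ans with
  | nil => simp
  | cons hd tl ih =>
    simp only [List.foldl_cons, List.countP_cons, pvStepA, h, if_true]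
    by_cases hne : hd.1 != "."
    · simp only [hne, if_true, ih]
      push_cast; ring
    · simp only [hne, Bool.false_eq_true, if_false, ih]
      simp

-- A's set update is a filter by per-letter survival
theorem pvUpdate_eq (s : PySem.Set Char) (a w : String) :
    (if a == "." || a == "?" then PySem.Set.diff s (PySem.Set.ofList w.toList)
     else PySem.Set.inter s (PySem.Set.ofList w.toList)) = s.filter (fun c => !pvKill c a w) := by
  have hcont : ∀ c : Char, (PySem.Set.ofList w.toList).contains c = w.toList.contains c := by
    intro c
    by_cases h : c ∈ w.toList <;>
      simp [PySem.Set.mem_ofList, h]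
  by_cases h : (a == "." || a == "?") = true
  · simp only [h, if_true, PySem.Set.diff]
    apply List.filter_congr
    intro c _
    simp [pvKill, h]
  · simp only [h, Bool.false_eq_true, if_false, PySem.Set.inter]
    apply List.filter_congr
    intro c _
    simp only [pvKill, h, hcont c]
    cases List.contains w.toList c <;> rfl

-- per-letter death time (Nat form used by the proofs)
def pvDeathN (c : Char) : List (String × String) → Nat
  | [] => 0
  | (a, w) :: t => if pvKill c a w then 0 else pvDeathN c t + 1

theorem pvDeathAux_eq (c : Char) : ∀ (ps : List (String × String)) (j : Int),
    pvDeathAux c ps j (j + (ps.length : Int)) = j + (pvDeathN c ps : Int) := by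
  intro ps
  induction ps with
  | nil => intro j; simp [pvDeathAux, pvDeathN]
  | cons hd tl ih =>
    intro j
    obtain ⟨a, w⟩ := hd
    simp only [pvDeathAux, pvDeathN]
    by_cases h : pvKill c a w
    · simp [h]
    · have h2 : j + ((tl.length + 1 : Nat) : Int) = (j + 1) + (tl.length : Int) := by push_cast; ring
      simp only [h, List.length_cons, h2, ih (j + 1)]
      push_cast; ring

theorem pvDeathAux_zero (c : Char) (ps : List (String × String)) :
    pvDeathAux c ps 0 (ps.length : Int) = (pvDeathN c ps : Int) := by
  have := pvDeathAux_eq c ps 0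
  simpa using this

-- the cutoff: first loop entry at which exactly one letter is alive (proof-side mirror of A)
def pvCut (s : List Char) : List (String × String) → Option Nat
  | [] => none
  | (a, w) :: t => if s.length = 1 then some 0
                   else (pvCut (s.filter (fun c => !pvKill c a w)) t).map (· + 1)

-- A's fold equals the cutoff-then-count reading
theorem pvMain (ps : List (String × String)) (s : PySem.Set Char) (ans : Int) :
    (ps.foldl pvStepA (s, ans)).2 =
      ans + (match pvCut s ps with
             | none => 0
             | some k => (((ps.drop k).countP (fun aw => aw.1 != ".")) : Int)) := by
  induction ps generalizing s ans with
  | nil => simp [pvCut]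
  | cons hd tl ih =>
    obtain ⟨a, w⟩ := hd
    by_cases h1 : s.length = 1
    · have hb : (PySem.Set.len s == 1) = true := by simp [PySem.Set.len, h1]
      rw [pvFoldA_len_one _ _ _ hb]
      simp [pvCut, h1]
    · have hb : (PySem.Set.len s == 1) = false := by
        simp [PySem.Set.len]; omega
      simp only [List.foldl_cons, pvStepA, hb, Bool.false_eq_true, if_false]
      have hstep : (if (a, w).1 == "." || (a, w).1 == "?" then
              (PySem.Set.diff s (PySem.Set.ofList (a, w).2.toList), ans)
            else (PySem.Set.inter s (PySem.Set.ofList (a, w).2.toList), ans))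
          = (s.filter (fun c => !pvKill c a w), ans) := by
        have := pvUpdate_eq s a w
        split <;> rename_i hsp <;> simp only [hsp, if_true, Bool.false_eq_true, if_false] at this <;>
          rw [this]
      rw [hstep, ih]
      simp only [pvCut, h1, if_false]
      cases hc : pvCut (s.filter (fun c => !pvKill c a w)) tl with
      | none => simp
      | some k => simp

-- number of letters of s still alive at loop entry k
def pvCnt (s : List Char) (ps : List (String × String)) (k : Nat) : Nat :=
  s.countP (fun c => decide (k ≤ pvDeathN c ps))

theorem pvCnt_zero (s : List Char) (ps : List (String × String)) :
    pvCnt s ps 0 = s.length := by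
  simp [pvCnt]

theorem pvCnt_shift (s : List Char) (a w : String) (t : List (String × String)) (k : Nat) :
    pvCnt s ((a, w) :: t) (k + 1) = pvCnt (s.filter (fun c => !pvKill c a w)) t k := by
  simp only [pvCnt, List.countP_filter]
  apply List.countP_congr
  intro c _
  by_cases h : pvKill c a w
  · simp [pvDeathN, h]
  · simp [pvDeathN, h]

-- characterization of the cutoff by the alive-counts
theorem pvCut_some (s : List Char) (ps : List (String × String)) (k : Nat)
    (h : pvCut s ps = some k) :
    k < ps.length ∧ pvCnt s ps k = 1 ∧ ∀ j, j < k → pvCnt s ps j ≠ 1 := by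
  induction ps generalizing s k with
  | nil => simp [pvCut] at h
  | cons hd tl ih =>
    obtain ⟨a, w⟩ := hd
    simp only [pvCut] at h
    by_cases h1 : s.length = 1
    · simp only [h1, if_true, Option.some.injEq] at h
      subst h
      refine ⟨by simp, by simp [pvCnt_zero, h1], by omega⟩
    · simp only [h1, if_false] at h
      cases hc : pvCut (s.filter (fun c => !pvKill c a w)) tl with
      | none => rw [hc] at h; simp at h
      | some k' =>
        rw [hc] at h
        simp only [Option.map_some, Option.some.injEq] at h
        subst h
        obtain ⟨hlt, hone, hmin⟩ := ih _ _ hc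
        refine ⟨by simpa using Nat.succ_lt_succ hlt, by rw [pvCnt_shift]; exact hone, ?_⟩
        intro j hj
        cases j with
        | zero => rw [pvCnt_zero]; exact h1
        | succ j' => rw [pvCnt_shift]; exact hmin j' (by omega)

theorem pvCut_none (s : List Char) (ps : List (String × String))
    (h : pvCut s ps = none) : ∀ k, k < ps.length → pvCnt s ps k ≠ 1 := by
  induction ps generalizing s with
  | nil => intro k hk; simp at hk
  | cons hd tl ih =>
    obtain ⟨a, w⟩ := hd
    simp only [pvCut] at h
    by_cases h1 : s.length = 1
    · simp [h1] at h
    · simp only [h1, if_false, Option.map_eq_none_iff] at h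
      intro k hk
      cases k with
      | zero => rw [pvCnt_zero]; exact h1
      | succ k' =>
        rw [pvCnt_shift]
        exact ih _ h k' (by simpa using Nat.succ_lt_succ_iff.mp hk)

-- invariant of B's top-two fold, phrased against the death multiset of the remaining letters
theorem pvTop2_inv (ps : List (String × String)) :
    ∀ (os : List Int) (st : Int × Int), st.2 ≤ st.1 →
      (os.foldl (pvTop2 ps) st).2 ≤ (os.foldl (pvTop2 ps) st).1 ∧
      ∀ k : Int,
        ((k ≤ (os.foldl (pvTop2 ps) st).1) ↔ (k ≤ st.1 ∨
            ∃ d ∈ os.map (fun o => pvDeathAux (Char.ofNat o.toNat) ps 0 (ps.length : Int)), k ≤ d)) ∧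
        ((k ≤ (os.foldl (pvTop2 ps) st).2) ↔
            2 ≤ (os.map (fun o => pvDeathAux (Char.ofNat o.toNat) ps 0 (ps.length : Int))).countP
                  (fun d => decide (k ≤ d))
                + (if k ≤ st.1 then 1 else 0) + (if k ≤ st.2 then 1 else 0)) := by
  intro os
  induction os with
  | nil =>
    intro st hst
    refine ⟨hst, fun k => ⟨by simp, ?_⟩⟩
    simp only [List.foldl_nil, List.map_nil, List.countP_nil, Nat.zero_add]
    constructor
    · intro h
      have h1 : k ≤ st.1 := le_trans h hst
      rw [if_pos h1, if_pos h]
    · intro h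
      split_ifs at h <;> omega
  | cons o os' ih =>
    intro st hst
    have hT : pvTop2 ps st o =
        (if pvDeathAux (Char.ofNat o.toNat) ps 0 (ps.length : Int) > st.1 then
            (pvDeathAux (Char.ofNat o.toNat) ps 0 (ps.length : Int), st.1)
          else if pvDeathAux (Char.ofNat o.toNat) ps 0 (ps.length : Int) > st.2 then
            (st.1, pvDeathAux (Char.ofNat o.toNat) ps 0 (ps.length : Int))
          else st) := rfl
    set d := pvDeathAux (Char.ofNat o.toNat) ps 0 (ps.length : Int) with hd
    have hP1 : (if d > st.1 then (d, st.1) else if d > st.2 then (st.1, d) else st).1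
        = if d > st.1 then d else st.1 := by
      split_ifs <;> rfl
    have hP2 : (if d > st.1 then (d, st.1) else if d > st.2 then (st.1, d) else st).2
        = if d > st.1 then st.1 else if d > st.2 then d else st.2 := by
      split_ifs <;> rfl
    have hst1 : (pvTop2 ps st o).2 ≤ (pvTop2 ps st o).1 := by
      rw [hT]
      rw [show ((if d > st.1 then (d, st.1) else if d > st.2 then (st.1, d) else st).2 ≤
            (if d > st.1 then (d, st.1) else if d > st.2 then (st.1, d) else st).1) =
          ((if d > st.1 then st.1 else if d > st.2 then d else st.2) ≤
            (if d > st.1 then d else st.1)) from by rw [hP1, hP2]]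
      split_ifs <;> omega
    obtain ⟨hle, hiff⟩ := ih (pvTop2 ps st o) hst1
    refine ⟨by rw [List.foldl_cons]; exact hle, ?_⟩
    intro k
    obtain ⟨h1, h2⟩ := hiff k
    constructor
    · rw [List.foldl_cons, h1, hT, hP1]
      simp only [List.map_cons, List.mem_cons]
      constructor
      · rintro (hk | ⟨e, he, hke⟩)
        · split_ifs at hk with hc1
          · exact Or.inr ⟨d, Or.inl rfl, hk⟩
          · exact Or.inl hk
        · exact Or.inr ⟨e, Or.inr he, hke⟩
      · rintro (hk | ⟨e, he | he, hke⟩)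
        · left; split_ifs with hc1 <;> omega
        · subst he; left; split_ifs with hc1 <;> omega
        · exact Or.inr ⟨e, he, hke⟩
    · rw [List.foldl_cons, h2, hT, hP1, hP2]
      simp only [List.map_cons, List.countP_cons, decide_eq_true_eq]
      split_ifs <;> omega

-- B's death values over the range are exactly the Nat death values of the alphabet
theorem pvAlphabet_map :
    pvAlphabet = (PySem.List.pyRange 97 123 1).map (fun o => Char.ofNat o.toNat) := by
  decide

theorem pvCnt_bridge (ps : List (String × String)) (k : Nat) :
    ((PySem.List.pyRange 97 123 1).map
        (fun o => pvDeathAux (Char.ofNat o.toNat) ps 0 (ps.length : Int))).countP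
      (fun d => decide ((k : Int) ≤ d)) = pvCnt pvAlphabet ps k := by
  rw [pvCnt, pvAlphabet_map, List.countP_map, List.countP_map]
  apply List.countP_congr
  intro o _
  simp only [Function.comp_apply, pvDeathAux_zero]
  simp

theorem pvCnt_alphabet_zero (ps : List (String × String)) :
    pvCnt pvAlphabet ps 0 = 26 := by
  rw [pvCnt_zero]
  decide

-- ===== VERDICT (by name: the statement is the Claim_ definition above) =====
theorem solve_spec : Claim_equal_solve := by
  intro n actions words _
  unfold Spec_solve
  simp only [solve, solve_alt]
  rw [show ((PySem.List.slice actions none (some (-1))).zip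
      (PySem.List.slice words none (some (-1)))) = pvPairs actions words from rfl]
  set ps := pvPairs actions words with hps
  rw [pvMain]
  obtain ⟨hle, hiff⟩ := pvTop2_inv ps (PySem.List.pyRange 97 123 1) (-1, -1) (by norm_num)
  set dd := (PySem.List.pyRange 97 123 1).foldl (pvTop2 ps) (-1, -1) with hdd
  have H1 : ∀ k : Int, (k ≤ dd.1 ↔ (k ≤ (-1 : Int) ∨
      ∃ d ∈ (PySem.List.pyRange 97 123 1).map
        (fun o => pvDeathAux (Char.ofNat o.toNat) ps 0 (ps.length : Int)), k ≤ d)) :=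
    fun k => (hiff k).1
  have H2 : ∀ k : Int, (k ≤ dd.2 ↔
      2 ≤ ((PySem.List.pyRange 97 123 1).map
            (fun o => pvDeathAux (Char.ofNat o.toNat) ps 0 (ps.length : Int))).countP
            (fun d => decide (k ≤ d)) + (if (k:Int) ≤ -1 then 1 else 0) + (if (k:Int) ≤ -1 then 1 else 0)) :=
    fun k => (hiff k).2
  have hd2nn : 0 ≤ dd.2 := by
    rw [H2 0]
    have hb := pvCnt_bridge ps 0
    simp only [Nat.cast_zero] at hb
    rw [hb, pvCnt_alphabet_zero]
    norm_num
  -- threshold translations for k ≥ 0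
  have hcnt1 : ∀ k : Nat, ((k : Int) ≤ dd.1 ↔ 1 ≤ pvCnt pvAlphabet ps k) := by
    intro k
    rw [H1 (k : Int), ← pvCnt_bridge ps k]
    constructor
    · rintro (h | ⟨d, hd, hkd⟩)
      · omega
      · exact List.countP_pos_iff.mpr ⟨d, hd, decide_eq_true hkd⟩
    · intro h
      obtain ⟨d, hd, hkd⟩ := List.countP_pos_iff.mp (Nat.lt_of_lt_of_le Nat.zero_lt_one h)
      exact Or.inr ⟨d, hd, of_decide_eq_true hkd⟩
  have hcnt2 : ∀ k : Nat, ((k : Int) ≤ dd.2 ↔ 2 ≤ pvCnt pvAlphabet ps k) := by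
    intro k
    rw [H2 (k : Int), ← pvCnt_bridge ps k]
    have hneg : ¬ ((k : Int) ≤ -1) := by omega
    simp [hneg]
  cases hc : pvCut pvAlphabet ps with
  | none =>
    have hnone := pvCut_none pvAlphabet ps hc
    have hcond : ¬ (dd.2 + 1 ≤ dd.1 ∧ dd.2 + 1 < (ps.length : Int)) := by
      rintro ⟨hcle, hclt⟩
      set k0 : Nat := (dd.2 + 1).toNat with hk0
      have hk0c : (k0 : Int) = dd.2 + 1 := by omega
      have hk0lt : k0 < ps.length := by omega
      have hge1 : 1 ≤ pvCnt pvAlphabet ps k0 := (hcnt1 k0).mp (by omega)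
      have hlt2 : ¬ 2 ≤ pvCnt pvAlphabet ps k0 := by
        intro h
        have := (hcnt2 k0).mpr h
        omega
      exact hnone k0 hk0lt (by omega)
    rw [if_neg hcond]
    norm_num
  | some k =>
    obtain ⟨hklt, hkone, hkmin⟩ := pvCut_some pvAlphabet ps k hc
    have hk1 : (k : Int) ≤ dd.1 := (hcnt1 k).mpr (by omega)
    have hk2 : ¬ ((k : Int) ≤ dd.2) := by
      intro h
      have := (hcnt2 k).mp h
      omega
    have hkeq : (k : Int) = dd.2 + 1 := by
      by_contra hne
      have hgt : dd.2 + 1 < (k : Int) := by omega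
      set j : Nat := (dd.2 + 1).toNat with hj
      have hjc : (j : Int) = dd.2 + 1 := by omega
      have hjk : j < k := by omega
      have hge1 : 1 ≤ pvCnt pvAlphabet ps j := (hcnt1 j).mp (by omega)
      have hlt2 : ¬ 2 ≤ pvCnt pvAlphabet ps j := by
        intro h
        have := (hcnt2 j).mpr h
        omega
      exact hkmin j hjk (by omega)
    have hcond : dd.2 + 1 ≤ dd.1 ∧ dd.2 + 1 < (ps.length : Int) := by
      constructor <;> omega
    rw [if_pos hcond, show dd.2 + 1 = ((k : Nat) : Int) from by omega,
      PySem.List.slice_from_natCast, Int.zero_add]
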